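-- pv_equiv track=rewrite | github.com/thiagoguarino/trybe-project36-restaurant-orders | src/inventory_control.py | ingredients_counter
-- ===== SOURCE A (Python) =====
-- from collections import Counter
--
-- def ingredients_counter(orders, INGREDIENTS):
--     ingredients_counter = Counter()
--
--     for order in orders:
--         for order_data in order:
--             if order_data in INGREDIENTS.keys():
--                 order_ingredients = INGREDIENTS[order_data]
--                 for ingredient in order_ingredients:
--                     ingredients_counter[ingredient] += 1
--     return ingredients_counter
-- ===== SOURCE B (Python) =====
-- from collections import Counter
--
-- def ingredients_counter(orders, INGREDIENTS):
--     tally = Counter(item for order in orders for item in order)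
--     expansion = [ingredient
--                  for item, cnt in tally.items()
--                  for ingredient in INGREDIENTS.get(item, []) * cnt]
--     return Counter(expansion)
-- ===== Notes on version B (the rewrite author's own statement) =====
-- stated objective: alternative
-- what changed: B is staged: it tallies all order items into a Counter, materialises one weighted expansion list (each distinct item's recipe repeated count times), and builds the result with a single Counter(...) call, instead of A's triple nested loop incrementing a Counter one occurrence at a time.
import Mathlib
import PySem

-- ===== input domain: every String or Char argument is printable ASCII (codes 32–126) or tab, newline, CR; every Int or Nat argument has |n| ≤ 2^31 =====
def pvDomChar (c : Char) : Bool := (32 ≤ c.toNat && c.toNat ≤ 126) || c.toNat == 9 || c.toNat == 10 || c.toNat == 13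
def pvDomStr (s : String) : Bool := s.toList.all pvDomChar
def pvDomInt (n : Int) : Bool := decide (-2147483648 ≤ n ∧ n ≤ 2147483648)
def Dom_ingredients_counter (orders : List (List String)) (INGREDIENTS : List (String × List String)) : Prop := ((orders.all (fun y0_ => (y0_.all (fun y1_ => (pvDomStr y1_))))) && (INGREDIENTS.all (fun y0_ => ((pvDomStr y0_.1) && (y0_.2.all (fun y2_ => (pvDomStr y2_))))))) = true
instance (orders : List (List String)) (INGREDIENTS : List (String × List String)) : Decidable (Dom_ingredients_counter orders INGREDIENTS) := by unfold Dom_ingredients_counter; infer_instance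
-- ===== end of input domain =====

-- B is staged: tally the order items, build one weighted expansion list (each distinct item's
-- recipe repeated count times), then a single Counter call ("alternative"; same cost class).


-- ===== PORT A =====
-- 'order_data in INGREDIENTS.keys()' followed by 'INGREDIENTS[order_data]' is the first-match
-- lookup: ported as one match on Dict.get? (some ↔ the key is present).
def ingredients_counter (orders : List (List String)) (INGREDIENTS : List (String × List String)) : List (String × Int) :=
  (orders.foldl (fun ic order =>
    order.foldl (fun ic order_data =>
      match (PySem.Dict.mk INGREDIENTS).get? order_data with
      | some order_ingredients =>
          order_ingredients.foldl (fun ic ingredient => ic.modify ingredient 0 (· + 1)) ic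
      | none => ic) ic)
    PySem.Dict.empty).items

-- ===== PORT B =====
-- 'INGREDIENTS.get(item, []) * cnt' is the recipe list repeated cnt times (replicate + flatten).
def ingredients_counter_alt (orders : List (List String)) (INGREDIENTS : List (String × List String)) : List (String × Int) :=
  let tally := PySem.Dict.counter (orders.flatMap id)
  let expansion := tally.items.flatMap (fun kv =>
    (List.replicate kv.2.toNat ((PySem.Dict.mk INGREDIENTS).getD kv.1 [])).flatten)
  (PySem.Dict.counter expansion).items

-- ===== PRECONDITION & SPEC =====
def Spec_ingredients_counter (orders : List (List String)) (INGREDIENTS : List (String × List String)) (out : List (String × Int)) : Prop := out = ingredients_counter_alt orders INGREDIENTS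
instance (orders : List (List String)) (INGREDIENTS : List (String × List String)) (out : List (String × Int)) : Decidable (Spec_ingredients_counter orders INGREDIENTS out) := by unfold Spec_ingredients_counter; infer_instance

-- ===== CLAIM =====
def Claim_equal_ingredients_counter : Prop := ∀ (orders : List (List String)) (INGREDIENTS : List (String × List String)), Dom_ingredients_counter orders INGREDIENTS → Spec_ingredients_counter orders INGREDIENTS (ingredients_counter orders INGREDIENTS)

-- ===== LEMMAS AND PROOFS =====

-- the recipe of an item: [] when the item is not a key
def pvRecipe (INGREDIENTS : List (String × List String)) (k : String) : List String :=
  (PySem.Dict.mk INGREDIENTS).getD k []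

theorem pv_match_eq_recipe {β : Type} (INGREDIENTS : List (String × List String)) (k : String)
    (F : β → String → β) (d : β) :
    (match (PySem.Dict.mk INGREDIENTS).get? k with
     | some lst => lst.foldl F d
     | none => d) = (pvRecipe INGREDIENTS k).foldl F d := by
  unfold pvRecipe
  simp only [PySem.Dict.getD]
  cases (PySem.Dict.mk INGREDIENTS).get? k <;> simp

theorem pv_foldl_flatMap {α β γ : Type} (l : List α) (g : α → List β) (F : γ → β → γ) (d : γ) :
    l.foldl (fun d x => (g x).foldl F d) d = (l.flatMap g).foldl F d := by
  induction l generalizing d with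
  | nil => rfl
  | cons x t ih => simp [List.flatMap_cons, List.foldl_append, ih]

-- A's nested loops are the counter of the occurrence-by-occurrence expansion
theorem A_eq_counter (orders : List (List String)) (INGREDIENTS : List (String × List String)) :
    ingredients_counter orders INGREDIENTS =
      (PySem.Dict.counter ((orders.flatten).flatMap (pvRecipe INGREDIENTS))).items := by
  unfold ingredients_counter
  simp only [pv_match_eq_recipe]
  rw [← List.foldl_flatten, pv_foldl_flatMap, PySem.Dict.counter_eq_foldl]

-- B is the counter of the weighted expansion over the distinct items
theorem B_eq_weighted (orders : List (List String)) (INGREDIENTS : List (String × List String)) :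
    ingredients_counter_alt orders INGREDIENTS =
      (PySem.Dict.counter ((PySem.Set.ofList orders.flatten).flatMap
        (fun k => (List.replicate ((orders.flatten).count k) (pvRecipe INGREDIENTS k)).flatten))).items := by
  unfold ingredients_counter_alt pvRecipe
  simp only [List.flatMap_id, PySem.Dict.items_counter, List.flatMap_map, Int.toNat_natCast]

theorem pv_update_self {β : Type} [BEq β] [LawfulBEq β] (s xs : List β) (h : ∀ y ∈ xs, y ∈ s) : PySem.Set.update s xs = s := by
  rw [PySem.Set.update_eq_append_filter]
  have : (PySem.Set.ofList xs).filter (fun y => !(PySem.Set.contains s y)) = [] := by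
    rw [List.filter_eq_nil_iff]
    intro y hy
    have hys : y ∈ s := h y ((PySem.Set.mem_ofList _ _).1 hy)
    simpa using hys
  rw [this, List.append_nil]

-- dedup commutes with flatMap inside Set.ofList
theorem ofList_flatMap_dedup {β : Type} [BEq β] [LawfulBEq β] (l : List String) (f : String → List β) :
    PySem.Set.ofList (l.flatMap f) = PySem.Set.ofList ((PySem.Set.ofList l).flatMap f) := by
  induction l using List.reverseRecOn with
  | nil => rfl
  | append_singleton l x ih =>
      rw [List.flatMap_append, PySem.Set.ofList_append, PySem.Set.ofList_append_singleton]
      by_cases hx : x ∈ l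
      · rw [PySem.Set.add_of_mem ((PySem.Set.mem_ofList _ _).2 hx), ← ih]
        apply pv_update_self
        intro y hy
        have hyx : y ∈ f x := by simpa using hy
        exact (PySem.Set.mem_ofList _ _).2 (List.mem_flatMap.2 ⟨x, hx, hyx⟩)
      · rw [PySem.Set.add_of_not_mem (fun hc => hx ((PySem.Set.mem_ofList _ _).1 hc)),
            List.flatMap_append, PySem.Set.ofList_append, ← ih]

-- updating by a repeated block is updating by the block once
theorem pv_update_replicate {β : Type} [BEq β] [LawfulBEq β] (n : Nat) (hn : 1 ≤ n) (lst s : List β) :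
    PySem.Set.update s ((List.replicate n lst).flatten) = PySem.Set.update s lst := by
  cases n with
  | zero => omega
  | succ m =>
      rw [List.replicate_succ, List.flatten_cons, PySem.Set.update_append]
      apply pv_update_self
      intro y hy
      have hyl : y ∈ lst := by
        rcases List.mem_flatten.1 hy with ⟨l', hl', hyl⟩
        rw [List.eq_of_mem_replicate hl'] at hyl
        exact hyl
      exact (PySem.Set.mem_update _ _ _).2 (Or.inr hyl)

theorem pv_update_flatMap_congr {β : Type} [BEq β] [LawfulBEq β] (l : List String)
    (g1 g2 : String → List β)
    (h : ∀ k ∈ l, ∀ s, PySem.Set.update s (g1 k) = PySem.Set.update s (g2 k)) :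
    ∀ s, PySem.Set.update s (l.flatMap g1) = PySem.Set.update s (l.flatMap g2) := by
  induction l with
  | nil => intro s; rfl
  | cons a t ih =>
      intro s
      rw [List.flatMap_cons, List.flatMap_cons, PySem.Set.update_append, PySem.Set.update_append,
        h a (by simp), ih (fun k hk => h k (by simp [hk]))]

theorem pv_count_replicate (n : Nat) (lst : List String) (g : String) :
    ((List.replicate n lst).flatten).count g = n * lst.count g := by
  induction n with
  | zero => simp
  | succ m ih => simp [List.replicate_succ, List.count_append, ih]; ring

theorem pv_sum_indicator (m : List String) (x : String) (h : String → Int)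
    (hnd : m.Nodup) (hx : x ∈ m) :
    (m.map (fun k => if x = k then h k else 0)).sum = h x := by
  induction m with
  | nil => cases hx
  | cons a t ih =>
      rcases List.mem_cons.1 hx with rfl | hxt
      · have : (t.map (fun k => if x = k then h k else 0)) = t.map (fun _ => (0:Int)) := by
          apply List.map_congr_left
          intro k hk
          have : x ≠ k := fun e => (List.nodup_cons.1 hnd).1 (e ▸ hk)
          simp [this]
        simp [this]
      · have hax : x ≠ a := fun e => (List.nodup_cons.1 hnd).1 (e ▸ hxt)
        simp [hax, ih (List.nodup_cons.1 hnd).2 hxt]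

-- grouping a sum by distinct values
theorem sum_group_by_count (l : List String) (h : String → Int) :
    ((PySem.Set.ofList l).map (fun k => ((l.count k : Int) * h k))).sum = (l.map h).sum := by
  induction l using List.reverseRecOn with
  | nil => rfl
  | append_singleton l x ih =>
      rw [PySem.Set.ofList_append_singleton]
      by_cases hx : x ∈ l
      · rw [PySem.Set.add_of_mem ((PySem.Set.mem_ofList _ _).2 hx)]
        have : ((PySem.Set.ofList l).map (fun k => (((l ++ [x]).count k : Int) * h k))) =
            ((PySem.Set.ofList l).map (fun k => ((l.count k : Int) * h k + (if x = k then h k else 0)))) := by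
          apply List.map_congr_left
          intro k hk
          by_cases hkx : x = k
          · simp [List.count_append, hkx]; ring
          · simp [List.count_append, hkx]
        rw [this, List.sum_map_add, ih,
            pv_sum_indicator _ _ _ (PySem.Set.nodup_ofList l) ((PySem.Set.mem_ofList _ _).2 hx)]
        simp
      · rw [PySem.Set.add_of_not_mem (fun hc => hx ((PySem.Set.mem_ofList _ _).1 hc))]
        have hcong : ((PySem.Set.ofList l).map (fun k => (((l ++ [x]).count k : Int) * h k))) =
            ((PySem.Set.ofList l).map (fun k => ((l.count k : Int) * h k))) := by
          apply List.map_congr_left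
          intro k hk
          have : x ≠ k := fun e => hx (e ▸ (PySem.Set.mem_ofList _ _).1 hk)
          have hxk : ¬ (x == k) = true := by simpa using this
          simp [List.count_append, List.count_singleton, hxk]
        rw [List.map_append, List.sum_append, hcong, ih]
        have : l.count x = 0 := List.count_eq_zero.2 hx
        simp [List.count_append, this]

theorem pv_count_flatMap (l : List String) (f : String → List String) (g : String) :
    ((l.flatMap f).count g : Int) = (l.map (fun x => ((f x).count g : Int))).sum := by
  induction l with
  | nil => simp
  | cons a t ih =>
      simp [List.flatMap_cons, List.count_append, ih]

-- ===== VERDICT =====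
theorem ingredients_counter_spec : Claim_equal_ingredients_counter := by
  intro orders ING _
  unfold Spec_ingredients_counter
  rw [A_eq_counter, B_eq_weighted]
  set F := orders.flatten with hF
  set r := pvRecipe ING with hr
  set EB := (PySem.Set.ofList F).flatMap (fun k => (List.replicate (F.count k) (r k)).flatten) with hEB
  have hsets : PySem.Set.ofList (F.flatMap r) = PySem.Set.ofList EB := by
    have h1 : PySem.Set.update ([] : List String) EB =
        PySem.Set.update ([] : List String) ((PySem.Set.ofList F).flatMap r) :=
      pv_update_flatMap_congr (PySem.Set.ofList F)
        (fun k => (List.replicate (F.count k) (r k)).flatten) r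
        (fun k hk s => pv_update_replicate (F.count k)
          (List.one_le_count_iff.2 ((PySem.Set.mem_ofList _ _).1 hk)) (r k) s) []
    calc PySem.Set.ofList (F.flatMap r)
        = PySem.Set.ofList ((PySem.Set.ofList F).flatMap r) := ofList_flatMap_dedup F r
      _ = PySem.Set.update ([] : List String) ((PySem.Set.ofList F).flatMap r) :=
          (PySem.Set.update_nil_left _).symm
      _ = PySem.Set.update ([] : List String) EB := h1.symm
      _ = PySem.Set.ofList EB := PySem.Set.update_nil_left _
  have hcounts : ∀ g, ((F.flatMap r).count g : Int) = (EB.count g : Int) := by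
    intro g
    rw [pv_count_flatMap, pv_count_flatMap]
    have : (PySem.Set.ofList F).map
        (fun x => (((List.replicate (F.count x) (r x)).flatten).count g : Int)) =
        (PySem.Set.ofList F).map (fun x => ((F.count x : Int) * ((r x).count g : Int))) := by
      apply List.map_congr_left
      intro k _
      rw [pv_count_replicate]
      push_cast
      ring
    rw [this, sum_group_by_count]
  rw [PySem.Dict.items_counter, PySem.Dict.items_counter, ← hsets]
  apply List.map_congr_left
  intro g hg
  have := hcounts g
  simp only [this]
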